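-- pv_equiv track=rewrite | github.com/jessegrabowski/cge_modeling | cge_modeling/gams/from_excel.py | make_tokens_from_sheet_name
-- ===== SOURCE A (Python) =====
-- def determine_indices(coords):
--     n_headers = None if coords["columns"] is None else len(coords["columns"])
--     n_index = len(coords["index"])
--
--     return n_headers, n_index
--
-- def make_tokens_from_sheet_name(sheet, coords):
--     n_headers, n_index = determine_indices(coords)
--     if n_headers is None:
--         return
--     tokens = [
--         x.strip() for token in sheet.split(",") for x in token.split("by") if len(x.strip()) > 0
--     ]
--     return tokens
-- ===== SOURCE B (Python) =====
-- def determine_indices(coords):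
--     n_headers = None if coords["columns"] is None else len(coords["columns"])
--     n_index = len(coords["index"])
--
--     return n_headers, n_index
--
--
-- def make_tokens_from_sheet_name(sheet, coords):
--     n_headers, n_index = determine_indices(coords)
--     if n_headers is None:
--         return
--     tokens = []
--     buf = []
--
--     def flush():
--         t = "".join(buf).strip()
--         if t:
--             tokens.append(t)
--         buf.clear()
--
--     i, n = 0, len(sheet)
--     while i < n:
--         c = sheet[i]
--         if c == ",":
--             flush()
--             i += 1
--         elif c == "b" and i + 1 < n and sheet[i + 1] == "y":
--             flush()
--             i += 2
--         else:
--             buf.append(c)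
--             i += 1
--     flush()
--     return tokens
-- ===== Notes on version B (the rewrite author's own statement) =====
-- stated objective: alternative
-- what changed: B replaces A's nested split-on-comma / split-on-'by' comprehension by a single left-to-right character scanner that maintains a token buffer and flushes a stripped token at each ',' or 'by' delimiter.
import Mathlib
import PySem

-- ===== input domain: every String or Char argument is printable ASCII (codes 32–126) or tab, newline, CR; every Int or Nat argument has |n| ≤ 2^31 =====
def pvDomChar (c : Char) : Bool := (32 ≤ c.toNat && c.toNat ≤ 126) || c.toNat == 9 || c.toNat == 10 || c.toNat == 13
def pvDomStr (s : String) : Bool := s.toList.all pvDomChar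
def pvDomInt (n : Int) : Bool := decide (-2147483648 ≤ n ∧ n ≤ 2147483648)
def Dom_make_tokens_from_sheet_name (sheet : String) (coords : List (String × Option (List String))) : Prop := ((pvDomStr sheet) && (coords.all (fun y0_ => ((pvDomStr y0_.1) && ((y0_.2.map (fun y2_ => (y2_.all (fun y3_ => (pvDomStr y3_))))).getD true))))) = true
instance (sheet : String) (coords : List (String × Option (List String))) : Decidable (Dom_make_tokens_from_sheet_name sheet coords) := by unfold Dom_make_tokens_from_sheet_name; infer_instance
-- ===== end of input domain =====

-- B replaces A's nested comma/"by" split passes by a single left-to-right character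
-- scanner with a token buffer (objective: alternative; same observable behaviour).

-- ===== PORT A =====
-- determine_indices(coords); `none` = the call raises (KeyError on a missing key,
-- TypeError from len(None) for coords["index"]); dict lookup = first match in the list.
def determine_indices (coords : List (String × Option (List String))) : Option (Option Int × Int) :=
  match coords.lookup "columns" with
  | none => none
  | some colv =>
    match coords.lookup "index" with
    | none => none
    | some none => none
    | some (some idx) => some (colv.map (fun l => (l.length : Int)), (idx.length : Int))

def make_tokens_from_sheet_name (sheet : String) (coords : List (String × Option (List String))) : Option (List String) :=
  match determine_indices coords with
  | none => none          -- the exception propagates (excluded by Pre_)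
  | some (none, _n_index) => none   -- `return` (Python None)
  | some (some _, _n_index) =>
    -- [x.strip() for token in sheet.split(",") for x in token.split("by") if len(x.strip()) > 0]
    some (((PySem.Chars.splitOn sheet.toList [',']).flatMap
            (fun token => PySem.Chars.splitOn token ['b', 'y'])).filterMap
          (fun x => let xs := PySem.Chars.strip x
                    if xs.length > 0 then some (String.ofList xs) else none))

-- ===== PORT B =====
def determine_indices_alt (coords : List (String × Option (List String))) : Option (Option Int × Int) :=
  match coords.lookup "columns" with
  | none => none
  | some colv =>
    match coords.lookup "index" with
    | none => none
    | some none => none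
    | some (some idx) => some (colv.map (fun l => (l.length : Int)), (idx.length : Int))

-- flush(): strip the buffer, append it to the output if non-empty
def bFlush (buf : List Char) (tokens : List String) : List String :=
  let t := PySem.Chars.strip buf
  if t.length > 0 then tokens ++ [String.ofList t] else tokens

-- the while loop over the characters of `sheet`
def bScan : List Char → List Char → List String → List String
  | [], buf, tokens => bFlush buf tokens
  | ',' :: rest, buf, tokens => bScan rest [] (bFlush buf tokens)
  | 'b' :: 'y' :: rest, buf, tokens => bScan rest [] (bFlush buf tokens)
  | c :: rest, buf, tokens => bScan rest (buf ++ [c]) tokens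

def make_tokens_from_sheet_name_alt (sheet : String) (coords : List (String × Option (List String))) : Option (List String) :=
  match determine_indices_alt coords with
  | none => none
  | some (none, _n_index) => none
  | some (some _, _n_index) => some (bScan sheet.toList [] [])

-- ===== PRECONDITION & SPEC =====
-- Pre_ excludes exactly the inputs on which A raises: a missing "columns" or "index"
-- key (KeyError) or coords["index"] = None (TypeError from len(None)).
def Pre_make_tokens_from_sheet_name (sheet : String) (coords : List (String × Option (List String))) : Prop :=
  (coords.lookup "columns").isSome = true ∧ ((coords.lookup "index").bind id).isSome = true
instance (sheet : String) (coords : List (String × Option (List String))) : Decidable (Pre_make_tokens_from_sheet_name sheet coords) := by unfold Pre_make_tokens_from_sheet_name; infer_instance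

def pvWitness_make_tokens_from_sheet_name : String × (List (String × Option (List String))) :=
  ("L, K by GDP", [("columns", some ["c"]), ("index", some ["i", "j"])])

def Spec_make_tokens_from_sheet_name (sheet : String) (coords : List (String × Option (List String))) (out : Option (List String)) : Prop := out = make_tokens_from_sheet_name_alt sheet coords
instance (sheet : String) (coords : List (String × Option (List String))) (out : Option (List String)) : Decidable (Spec_make_tokens_from_sheet_name sheet coords out) := by unfold Spec_make_tokens_from_sheet_name; infer_instance

-- ===== CLAIM (what is proved, stated in full; the proofs are below) =====
def Claim_equal_make_tokens_from_sheet_name : Prop := ∀ (sheet : String) (coords : List (String × Option (List String))), Dom_make_tokens_from_sheet_name sheet coords → Pre_make_tokens_from_sheet_name sheet coords → Spec_make_tokens_from_sheet_name sheet coords (make_tokens_from_sheet_name sheet coords)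

-- ===== LEMMAS AND PROOFS =====

-- split on a single character, structurally
def split1 : List Char → List (List Char)
  | [] => [[]]
  | c :: rest => if c = ',' then [] :: split1 rest else (split1 rest).modifyHead (c :: ·)

-- split on the two-character separator "by", structurally
def split2 : List Char → List (List Char)
  | [] => [[]]
  | [c] => [[c]]
  | c :: d :: rest =>
    if c = 'b' ∧ d = 'y' then [] :: split2 rest
    else (split2 (d :: rest)).modifyHead (c :: ·)

-- combined greedy split on ',' or "by"
def comb : List Char → List (List Char)
  | [] => [[]]
  | ',' :: rest => [] :: comb rest
  | 'b' :: 'y' :: rest => [] :: comb rest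
  | c :: rest => (comb rest).modifyHead (c :: ·)

def finishTok (x : List Char) : Option String :=
  let xs := PySem.Chars.strip x
  if xs.length > 0 then some (String.ofList xs) else none

theorem split1_ne_nil (l : List Char) : split1 l ≠ [] := by
  induction l with
  | nil => simp [split1]
  | cons c rest ih =>
    simp only [split1]
    split
    · simp
    · cases h : split1 rest with
      | nil => exact absurd h ih
      | cons a t => simp

theorem split2_ne_nil (l : List Char) : split2 l ≠ [] := by
  induction l using split2.induct with
  | case1 => simp [split2]
  | case2 c => simp [split2]
  | case3 c d rest h ih => simp [split2, h]
  | case4 c d rest h ih =>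
    simp only [split2, if_neg h]
    cases hs : split2 (d :: rest) with
    | nil => exact absurd hs ih
    | cons a t => simp

theorem splitOn_go_split1 (fuel : Nat) (l cur : List Char) (acc : List (List Char))
    (h : l.length + 1 ≤ fuel) :
    PySem.Chars.splitOn.go [','] fuel l cur acc
      = acc.reverse ++ (split1 l).modifyHead (cur.reverse ++ ·) := by
  induction fuel generalizing l cur acc with
  | zero => omega
  | succ fuel ih =>
    cases l with
    | nil => simp [PySem.Chars.splitOn.go, split1]
    | cons c rest =>
      by_cases hc : c = ','
      · subst hc
        have : List.isPrefixOf [','] (',' :: rest) = true := by simp [List.isPrefixOf]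
        rw [PySem.Chars.splitOn.go]
        simp only [this, if_true, List.length, List.drop]
        rw [ih rest [] (cur.reverse :: acc) (by simp at h ⊢; omega)]
        simp only [split1]
        cases split1 rest <;> simp
      · have hpre : List.isPrefixOf [','] (c :: rest) = false := by
          simp [List.isPrefixOf, Ne.symm hc]
        rw [PySem.Chars.splitOn.go]
        simp only [hpre, Bool.false_eq_true, if_false]
        rw [ih rest (c :: cur) acc (by simp at h ⊢; omega)]
        simp only [split1, if_neg hc]
        cases hs : split1 rest with
        | nil => exact absurd hs (split1_ne_nil rest)
        | cons a t => simp

theorem splitOn_go_split2 (fuel : Nat) (l cur : List Char) (acc : List (List Char))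
    (h : l.length + 1 ≤ fuel) :
    PySem.Chars.splitOn.go ['b', 'y'] fuel l cur acc
      = acc.reverse ++ (split2 l).modifyHead (cur.reverse ++ ·) := by
  induction fuel using Nat.strong_induction_on generalizing l cur acc with
  | _ fuel ih =>
    match fuel, h with
    | fuel + 1, h =>
      cases l with
      | nil => simp [PySem.Chars.splitOn.go, split2]
      | cons c rest =>
        cases rest with
        | nil =>
          have hpre : List.isPrefixOf ['b', 'y'] [c] = false := by
            simp [List.isPrefixOf]
          rw [PySem.Chars.splitOn.go]
          simp only [hpre, Bool.false_eq_true, if_false]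
          match fuel, h with
          | fuel + 1, h => simp [PySem.Chars.splitOn.go, split2]
        | cons d rest2 =>
          by_cases hby : c = 'b' ∧ d = 'y'
          · obtain ⟨hc, hd⟩ := hby; subst hc; subst hd
            have hpre : List.isPrefixOf ['b', 'y'] ('b' :: 'y' :: rest2) = true := by
              simp [List.isPrefixOf]
            rw [PySem.Chars.splitOn.go]
            simp only [hpre, if_true, List.length, List.drop]
            rw [ih fuel (by omega) rest2 [] (cur.reverse :: acc) (by simp at h ⊢; omega)]
            cases hs2 : split2 rest2 <;> simp [split2, hs2]
          · have hpre : List.isPrefixOf ['b', 'y'] (c :: d :: rest2) = false := by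
              simp [List.isPrefixOf]
              intro h1 h2
              exact hby ⟨h1.symm, h2.symm⟩
            rw [PySem.Chars.splitOn.go]
            simp only [hpre, Bool.false_eq_true, if_false]
            rw [ih fuel (by omega) (d :: rest2) (c :: cur) acc (by simp at h ⊢; omega)]
            simp only [split2, if_neg hby]
            cases hs : split2 (d :: rest2) with
            | nil => exact absurd hs (split2_ne_nil _)
            | cons a t => simp

theorem splitOn_comma (l : List Char) : PySem.Chars.splitOn l [','] = split1 l := by
  rw [PySem.Chars.splitOn, splitOn_go_split1 _ _ _ _ (by omega)]
  cases hs : split1 l with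
  | nil => exact absurd hs (split1_ne_nil l)
  | cons a t => simp

theorem splitOn_by (l : List Char) : PySem.Chars.splitOn l ['b', 'y'] = split2 l := by
  rw [PySem.Chars.splitOn, splitOn_go_split2 _ _ _ _ (by omega)]
  cases hs : split2 l with
  | nil => exact absurd hs (split2_ne_nil l)
  | cons a t => simp

-- head of the first comma-piece of l is the head of l (when l does not start with ',')
theorem split1_head (l : List Char) (a : List Char) (t : List (List Char))
    (hs : split1 l = a :: t) (c : Char) (hc : a.head? = some c) :
    l.head? = some c := by
  cases l with
  | nil =>
    simp only [split1] at hs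
    injection hs with h1 h2
    subst h1
    simp at hc
  | cons x rest =>
    by_cases hx : x = ','
    · subst hx
      simp only [split1] at hs
      injection hs with h1 h2
      subst h1
      simp at hc
    · simp only [split1, if_neg hx] at hs
      cases hr : split1 rest with
      | nil => exact absurd hr (split1_ne_nil rest)
      | cons b tb =>
        rw [hr, List.modifyHead_cons] at hs
        injection hs with h1 h2
        subst h1
        simp_all

theorem split1_cons (c : Char) (rest : List Char) (hc : ¬ c = ',') :
    split1 (c :: rest) = (split1 rest).modifyHead (c :: ·) := by
  simp [split1, hc]

theorem split2_cons (c : Char) (h : List Char)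
    (hns : ¬(c = 'b' ∧ h.head? = some 'y')) :
    split2 (c :: h) = (split2 h).modifyHead (c :: ·) := by
  cases h with
  | nil => simp [split2]
  | cons d rest =>
    have : ¬(c = 'b' ∧ d = 'y') := by simpa using hns
    simp [split2, this]

theorem comb_cons (c : Char) (rest : List Char) (hc : ¬ c = ',')
    (hby : ¬(c = 'b' ∧ rest.head? = some 'y')) :
    comb (c :: rest) = (comb rest).modifyHead (c :: ·) := by
  rw [comb.eq_def]
  split <;> simp_all

theorem comb_ne_nil (l : List Char) : comb l ≠ [] := by
  induction l using comb.induct with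
  | case1 => simp [comb]
  | case2 rest ih => simp [comb]
  | case3 rest ih => simp [comb]
  | case4 c rest hc hby ih =>
    have hc' : ¬ c = ',' := fun h => hc h
    have hby' : ¬(c = 'b' ∧ rest.head? = some 'y') := by
      rintro ⟨rfl, hh⟩
      cases rest with
      | nil => simp at hh
      | cons d r2 =>
        simp at hh
        exact hby r2 rfl (by rw [hh])
    rw [comb_cons c rest hc' hby']
    cases hcm : comb rest with
    | nil => exact absurd hcm ih
    | cons a t => simp

theorem flatMap_split_comb (l : List Char) :
    (split1 l).flatMap split2 = comb l := by
  induction l using comb.induct with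
  | case1 => simp [split1, split2, comb]
  | case2 rest ih =>
    simp only [split1, comb, ← ih]
    simp [split2]
  | case3 rest ih =>
    have h1 : split1 ('b' :: 'y' :: rest)
        = (split1 rest).modifyHead (fun p => 'b' :: 'y' :: p) := by
      rw [split1_cons 'b' _ (by decide), split1_cons 'y' _ (by decide)]
      cases hs : split1 rest with
      | nil => exact absurd hs (split1_ne_nil rest)
      | cons a t => simp
    rw [h1]
    cases hs : split1 rest with
    | nil => exact absurd hs (split1_ne_nil rest)
    | cons a t =>
      rw [hs] at ih
      simp only [List.modifyHead_cons, List.flatMap_cons, comb, ← ih]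
      simp [split2]
  | case4 c rest hc hby ih =>
    have hc' : ¬ c = ',' := fun h => hc h
    have hby' : ¬(c = 'b' ∧ rest.head? = some 'y') := by
      rintro ⟨rfl, hh⟩
      cases rest with
      | nil => simp at hh
      | cons d r2 =>
        simp at hh
        exact hby r2 rfl (by rw [hh])
    rw [split1_cons c rest hc', comb_cons c rest hc' hby']
    cases hs : split1 rest with
    | nil => exact absurd hs (split1_ne_nil rest)
    | cons a t =>
      rw [hs] at ih
      have hsc : split2 (c :: a) = (split2 a).modifyHead (c :: ·) := by
        apply split2_cons
        rintro ⟨rfl, hha⟩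
        exact hby' ⟨rfl, split1_head rest a t hs 'y' hha⟩
      rw [← ih]
      simp only [List.modifyHead_cons, List.flatMap_cons, hsc]
      cases h2 : split2 a with
      | nil => exact absurd h2 (split2_ne_nil a)
      | cons b tb => simp

theorem bScan_cons (c : Char) (rest buf : List Char) (tokens : List String)
    (hc : ¬ c = ',') (hby : ¬(c = 'b' ∧ rest.head? = some 'y')) :
    bScan (c :: rest) buf tokens = bScan rest (buf ++ [c]) tokens := by
  rw [bScan.eq_def]
  split <;> simp_all

theorem bScan_comb (l : List Char) (buf : List Char) (tokens : List String) :
    bScan l buf tokens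
      = tokens ++ ((comb l).modifyHead (buf ++ ·)).filterMap finishTok := by
  induction l using comb.induct generalizing buf tokens with
  | case1 =>
    simp only [bScan, comb, List.modifyHead_cons, List.append_nil,
      List.filterMap_cons, bFlush, finishTok]
    split <;> simp
  | case2 rest ih =>
    rw [bScan, ih, comb]
    simp only [List.modifyHead_cons, List.filterMap_cons, bFlush, finishTok]
    cases hcm : comb rest with
    | nil => exact absurd hcm (comb_ne_nil rest)
    | cons a t =>
      simp only [List.modifyHead_cons, List.nil_append]
      split <;> rename_i hgt <;> simp [hgt]
  | case3 rest ih =>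
    rw [bScan, ih, comb]
    simp only [List.modifyHead_cons, List.filterMap_cons, bFlush, finishTok]
    cases hcm : comb rest with
    | nil => exact absurd hcm (comb_ne_nil rest)
    | cons a t =>
      simp only [List.modifyHead_cons, List.nil_append]
      split <;> rename_i hgt <;> simp [hgt]
  | case4 c rest hc hby ih =>
    have hc' : ¬ c = ',' := fun h => hc h
    have hby' : ¬(c = 'b' ∧ rest.head? = some 'y') := by
      rintro ⟨rfl, hh⟩
      cases rest with
      | nil => simp at hh
      | cons d r2 =>
        simp at hh
        exact hby r2 rfl (by rw [hh])
    rw [bScan_cons c rest buf tokens hc' hby', ih, comb_cons c rest hc' hby']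
    cases hcm : comb rest with
    | nil => exact absurd hcm (comb_ne_nil rest)
    | cons a t => simp

theorem main_eq (l : List Char) :
    ((PySem.Chars.splitOn l [',']).flatMap
        (fun token => PySem.Chars.splitOn token ['b', 'y'])).filterMap
      (fun x => let xs := PySem.Chars.strip x
                if xs.length > 0 then some (String.ofList xs) else none)
      = bScan l [] [] := by
  have h1 : (fun token => PySem.Chars.splitOn token ['b', 'y']) = split2 := by
    funext t; exact splitOn_by t
  rw [splitOn_comma, h1, flatMap_split_comb, bScan_comb]
  cases hc : comb l with
  | nil => exact absurd hc (comb_ne_nil l)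
  | cons a t => simp [finishTok]

-- ===== VERDICT (by name: the statement is the Claim_ definition above) =====
theorem make_tokens_from_sheet_name_spec : Claim_equal_make_tokens_from_sheet_name := by
  intro sheet coords _hdom hpre
  unfold Spec_make_tokens_from_sheet_name
  unfold make_tokens_from_sheet_name make_tokens_from_sheet_name_alt
  unfold determine_indices determine_indices_alt
  obtain ⟨h1, h2⟩ := hpre
  cases hc : coords.lookup "columns" with
  | none => simp_all
  | some colv =>
    cases hi : coords.lookup "index" with
    | none => simp_all
    | some iv =>
      cases iv with
      | none => simp_all
      | some idx =>
        cases colv <;> simp [main_eq]
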